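-- pv_equiv track=rewrite | github.com/sonneveld/advent-of-code | advent15/24/solution.py | part_2
-- ===== SOURCE A (Python) =====
-- import functools
-- from itertools import combinations
--
-- def group_comb(packages, wanted_size):
--     for n in range(1, len(packages)+1):
--         for x in combinations(packages, n):
--             if sum(x) == wanted_size:
--                 yield x
--
-- def part_2(data):
--
--     data = list(data)
--     data.sort(reverse=True)
--
--     assert sum(data) % 4 == 0
--     group_size = sum(data) // 4
--
--     result = (99999, 0)
--
--     for x in group_comb(data, group_size):
--         next_res = len(x), functools.reduce(lambda x,y: x*y, x)
--         if next_res < result: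
--             result = next_res
--
--     return result[1]
-- ===== SOURCE B (Python) =====
-- from itertools import combinations
--
-- def part_2(data):
--     items = list(data)
--     total = sum(items)
--     assert total % 4 == 0
--     target = total // 4
--     for k in range(1, len(items) + 1):
--         products = []
--         for c in combinations(items, k):
--             if sum(c) == target:
--                 p = 1
--                 for v in c:
--                     p *= v
--                 products.append(p)
--         if products:
--             return min(products)
--     return 0
-- ===== Notes on version B (the rewrite author's own statement) =====
-- stated objective: alternative
-- what changed: B drops the sort and the lexicographic (len, product) running minimum over all subsets: it enumerates combination sizes ascending and returns the minimum product at the first size that has a subset summing to a quarter of the total, stopping there.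
import Mathlib
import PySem

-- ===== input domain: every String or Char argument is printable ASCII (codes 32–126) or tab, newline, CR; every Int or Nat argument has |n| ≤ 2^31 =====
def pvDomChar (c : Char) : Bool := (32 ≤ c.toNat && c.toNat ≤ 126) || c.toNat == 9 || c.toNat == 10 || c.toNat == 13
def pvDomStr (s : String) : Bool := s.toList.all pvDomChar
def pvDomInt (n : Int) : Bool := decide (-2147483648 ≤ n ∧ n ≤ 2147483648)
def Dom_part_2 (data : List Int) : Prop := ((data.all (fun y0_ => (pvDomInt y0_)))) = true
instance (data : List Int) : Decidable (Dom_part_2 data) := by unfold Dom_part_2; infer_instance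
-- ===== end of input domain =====

-- B enumerates subset sizes ascending and stops at the first size admitting a subset summing to
-- a quarter of the total (returning the min product there), instead of A's lexicographic
-- (len, product) running minimum over every subset of the reverse-sorted list; objective: alternative.


-- ===== PORT A =====
-- itertools.combinations(xs, n) (shared helper: both Pythons call it)
def pyCombinations : Nat → List Int → List (List Int)
  | 0, _ => [[]]
  | _ + 1, [] => []
  | n + 1, x :: xs => (pyCombinations n xs).map (x :: ·) ++ pyCombinations (n + 1) xs

-- functools.reduce(lambda x,y: x*y, x); x is always nonempty where A calls it ([] case unreachable)
def prodReduce : List Int → Int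
  | [] => 0
  | h :: t => t.foldl (· * ·) h

-- Python tuple comparison next_res < result on (Int, Int)
def pyLtPair (a b : Int × Int) : Bool := a.1 < b.1 || (a.1 == b.1 && a.2 < b.2)

-- group_comb: the generator flattened into the list of yielded combinations, in yield order
def groupComb (packages : List Int) (wanted : Int) : List (List Int) :=
  (List.range packages.length).flatMap
    (fun i => (pyCombinations (i + 1) packages).filter (fun x => x.sum == wanted))

def part_2 (data : List Int) : Int :=
  let d := PySem.List.sorted data (fun x => x) true
  let groupSize := PySem.Int.floordiv d.sum 4
  let result := (groupComb d groupSize).foldl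
    (fun res x =>
      let next := ((x.length : Int), prodReduce x)
      if pyLtPair next res then next else res)
    ((99999 : Int), (0 : Int))
  result.2

-- ===== PORT B =====
-- p = 1; for v in c: p *= v
def prodAcc (c : List Int) : Int := c.foldl (· * ·) 1

-- the 'for k in range(1, len(items)+1)' loop: fuel = remaining sizes, k = current size
def altSearch (items : List Int) (target : Int) : Nat → Nat → Int
  | 0, _ => 0
  | fuel + 1, k =>
    match ((pyCombinations k items).filter (fun c => c.sum == target)).map prodAcc with
    | [] => altSearch items target fuel (k + 1)
    | p :: ps => ps.foldl min p      -- min(products)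

def part_2_alt (data : List Int) : Int :=
  let target := PySem.Int.floordiv data.sum 4
  altSearch data target data.length 1

-- ===== PRECONDITION & SPEC =====
-- Pre_ excludes (a) inputs whose sum is not divisible by 4, on which A raises AssertionError, and
-- (b) lists of at least 99999 elements, where A's sentinel initial result of length 99999 and
-- product 0 could override a genuine solution (A's exhaustive subset enumeration cannot
-- terminate on such lengths in practice anyway).
def Pre_part_2 (data : List Int) : Prop :=
  PySem.Int.mod data.sum 4 = 0 ∧ data.length < 99999
instance (data : List Int) : Decidable (Pre_part_2 data) := by unfold Pre_part_2; infer_instance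
def pvWitness_part_2 : List Int := [20, 4, -8, 7, 1]

def Spec_part_2 (data : List Int) (out : Int) : Prop := out = part_2_alt data
instance (data : List Int) (out : Int) : Decidable (Spec_part_2 data out) := by unfold Spec_part_2; infer_instance

-- ===== CLAIM (what is proved, stated in full; the proofs are below) =====
def Claim_equal_part_2 : Prop := ∀ (data : List Int), Dom_part_2 data → Pre_part_2 data → Spec_part_2 data (part_2 data)

-- ===== LEMMAS AND PROOFS =====

-- proof-side defs
def prodsAt (t : Int) (k : Nat) (l : List Int) : List Int :=
  ((pyCombinations k l).filter (fun c => c.sum == t)).map prodAcc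

def firstNE (t : Int) (l : List Int) : List Nat → Option (Nat × Int)
  | [] => none
  | k :: rest =>
    match prodsAt t k l with
    | [] => firstNE t l rest
    | p :: ps => some (k, ps.foldl min p)

def foldStep (r q : Int × Int) : Int × Int := if pyLtPair q r then q else r

def blockP (t : Int) (l : List Int) (k : Nat) : List (Int × Int) :=
  (prodsAt t k l).map (fun p => ((k : Int), p))

-- 1. comb ~ sublistsLen
theorem comb_perm_sub : ∀ (l : List Int) (n : Nat), (pyCombinations n l).Perm (List.sublistsLen n l)
  | l, 0 => by simp [pyCombinations]
  | [], n+1 => by simp [pyCombinations]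
  | x :: xs, n+1 => by
    rw [pyCombinations, List.sublistsLen_succ_cons]
    exact (((comb_perm_sub xs n).map _).append (comb_perm_sub xs (n+1))).trans
      (List.perm_append_comm)

theorem length_of_mem_comb {x : List Int} {n : Nat} {l : List Int}
    (h : x ∈ pyCombinations n l) : x.length = n := by
  have := (comb_perm_sub l n).mem_iff.mp h
  exact (List.mem_sublistsLen.mp this).2

-- 2. multiset-of-combinations is perm-invariant
theorem combsM_perm {l₁ l₂ : List Int} (h : l₁.Perm l₂) (n : Nat) :
    ((pyCombinations n l₁).map Multiset.ofList).Perm ((pyCombinations n l₂).map Multiset.ofList) := by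
  have mid : ((List.sublistsLen n l₁).map (Multiset.ofList)).Perm
      ((List.sublistsLen n l₂).map (Multiset.ofList)) := by
    have := Multiset.powersetCardAux_perm (n := n) h
    simpa [Multiset.powersetCardAux_eq_map_coe] using this
  exact (((comb_perm_sub l₁ n).map _).trans mid).trans ((comb_perm_sub l₂ n).map _).symm

-- 3/4. products
theorem prodAcc_eq_prod (c : List Int) : prodAcc c = c.prod := List.prod_eq_foldl.symm

theorem prodReduce_eq_prodAcc {c : List Int} (h : c ≠ []) : prodReduce c = prodAcc c := by
  cases c with
  | nil => exact absurd rfl h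
  | cons x xs => simp [prodReduce, prodAcc]

-- 5. prodsAt is perm-invariant
theorem prodsAt_perm {l₁ l₂ : List Int} (h : l₁.Perm l₂) (t : Int) (k : Nat) :
    (prodsAt t k l₁).Perm (prodsAt t k l₂) := by
  have hf : prodAcc
      = (Prod.snd ∘ ((fun m : Multiset Int => ((m.sum, m.prod) : Int × Int)) ∘ Multiset.ofList)) := by
    funext c; simp [Function.comp, Multiset.prod_coe, prodAcc_eq_prod]
  have hq : (fun c : List Int => c.sum == t)
      = ((fun q : Int × Int => q.1 == t) ∘ ((fun m : Multiset Int => ((m.sum, m.prod) : Int × Int)) ∘ Multiset.ofList)) := by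
    funext c; simp [Function.comp, Multiset.sum_coe]
  have key : ∀ l : List Int, prodsAt t k l =
      (((pyCombinations k l).map Multiset.ofList).map
        (fun m => ((m.sum, m.prod) : Int × Int)) |>.filter (fun q => q.1 == t)).map Prod.snd := by
    intro l
    rw [List.map_map, List.filter_map, List.map_map]
    unfold prodsAt
    rw [hf, hq]
  rw [key l₁, key l₂]
  exact (((combsM_perm h k).map _).filter _).map _

-- 6. min? is perm-invariant
theorem min?_perm (xs ys : List Int) (h : xs.Perm ys) : xs.min? = ys.min? := by
  cases hx : xs.min? with
  | none => cases hy : ys.min? with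
    | none => rfl
    | some b =>
      rw [List.min?_eq_none_iff] at hx
      subst hx; simp [h.symm.eq_nil] at hy
  | some a =>
    cases hy : ys.min? with
    | none =>
      rw [List.min?_eq_none_iff] at hy
      subst hy; simp [h.eq_nil] at hx
    | some b =>
      rw [List.min?_eq_some_iff] at hx hy
      have hab : a ≤ b := hx.2 b (h.mem_iff.mpr hy.1)
      have hba : b ≤ a := hy.2 a (h.mem_iff.mp hx.1)
      simp [le_antisymm hab hba]

-- 7. firstNE is perm-invariant
theorem firstNE_congr {l₁ l₂ : List Int} (h : l₁.Perm l₂) (t : Int) :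
    ∀ ks : List Nat, firstNE t l₁ ks = firstNE t l₂ ks := by
  intro ks
  induction ks with
  | nil => rfl
  | cons k rest ih =>
    have hp := prodsAt_perm h t k
    rw [firstNE, firstNE]
    cases h₁ : prodsAt t k l₁ with
    | nil =>
      cases h₂ : prodsAt t k l₂ with
      | nil => simpa using ih
      | cons p ps => rw [h₁, h₂] at hp; simp at hp
    | cons p ps =>
      cases h₂ : prodsAt t k l₂ with
      | nil => rw [h₁, h₂] at hp; simp at hp
      | cons p' ps' =>
        rw [h₁, h₂] at hp
        have hm := min?_perm _ _ hp
        rw [List.min?_cons', List.min?_cons'] at hm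
        simp only [Option.some.injEq] at hm
        simp [hm]

-- 8. fold lemmas
theorem foldl_skip (k : Nat) (ps : List Int) (r : Int × Int) (hr : r.1 < (k : Int)) :
    List.foldl foldStep r (ps.map (fun p => ((k : Int), p))) = r := by
  induction ps with
  | nil => rfl
  | cons p ps ih =>
    have hlt : pyLtPair ((k : Int), p) r = false := by
      simp [pyLtPair]; omega
    simp only [List.map_cons, List.foldl_cons, foldStep, hlt, Bool.false_eq_true, if_false]
    exact ih

theorem foldl_within (k : Nat) (ps : List Int) (m : Int) :
    List.foldl foldStep ((k : Int), m) (ps.map (fun p => ((k : Int), p))) = ((k : Int), ps.foldl min m) := by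
  induction ps generalizing m with
  | nil => rfl
  | cons p ps ih =>
    have hstep : foldStep ((k : Int), m) ((k : Int), p) = ((k : Int), min m p) := by
      by_cases hpm : p < m
      · simp [foldStep, pyLtPair, hpm, min_eq_right (le_of_lt hpm)]
      · simp [foldStep, pyLtPair, hpm, min_eq_left (le_of_not_gt hpm)]
    simp only [List.map_cons, List.foldl_cons, hstep, List.foldl_cons]
    exact ih (min m p)

theorem foldl_win (k : Nat) (p : Int) (ps : List Int) (r : Int × Int) (hr : (k : Int) < r.1) :
    List.foldl foldStep r ((p :: ps).map (fun q => ((k : Int), q))) = ((k : Int), ps.foldl min p) := by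
  have hlt : pyLtPair ((k : Int), p) r = true := by
    simp [pyLtPair]; omega
  simp only [List.map_cons, List.foldl_cons, foldStep, hlt, if_true]
  exact foldl_within k ps p

theorem foldl_skip_all (t : Int) (l : List Int) (ks : List Nat) (r : Int × Int)
    (hr : ∀ k ∈ ks, r.1 < (k : Int)) :
    List.foldl foldStep r (ks.flatMap (blockP t l)) = r := by
  induction ks with
  | nil => rfl
  | cons k rest ih =>
    rw [List.flatMap_cons, List.foldl_append, blockP,
      foldl_skip k _ r (hr k (by simp))]
    exact ih (fun k' hk' => hr k' (by simp [hk']))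

theorem chainA (t : Int) (l : List Int) (ks : List Nat) (r : Int × Int)
    (hs : ks.Pairwise (· < ·)) (hb : ∀ k ∈ ks, (k : Int) < r.1) :
    List.foldl foldStep r (ks.flatMap (blockP t l)) =
      (match firstNE t l ks with
       | none => r
       | some (k, m) => (((k : Nat) : Int), m)) := by
  induction ks generalizing r with
  | nil => rfl
  | cons k rest ih =>
    rw [List.flatMap_cons, List.foldl_append, firstNE]
    cases hpk : prodsAt t k l with
    | nil =>
      rw [blockP, hpk]
      simp only [List.map_nil, List.foldl_nil]
      exact ih r (List.Pairwise.sublist (List.sublist_cons_self k rest) hs)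
        (fun k' hk' => hb k' (by simp [hk']))
    | cons p ps =>
      rw [blockP, hpk, foldl_win k p ps r (hb k (by simp))]
      exact foldl_skip_all t l rest _ (by
        intro k' hk'
        have : k < k' := (List.pairwise_cons.mp hs).1 k' hk'
        simp only []
        exact_mod_cast this)

-- 9. B-side characterisation
theorem altSearch_eq (items : List Int) (t : Int) :
    ∀ (fuel k : Nat), altSearch items t fuel k =
      (match firstNE t items (List.range' k fuel) with
       | none => 0
       | some (_, m) => m) := by
  intro fuel
  induction fuel with
  | zero => intro k; rfl
  | succ n ih =>
    intro k
    rw [List.range'_succ, firstNE, altSearch]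
    cases hpk : prodsAt t k items with
    | nil =>
      rw [prodsAt] at hpk
      rw [hpk]
      exact ih (k + 1)
    | cons p ps =>
      rw [prodsAt] at hpk
      rw [hpk]

-- 10. A-side massage
theorem groupComb_split (l : List Int) (t : Int) :
    groupComb l t = (List.range' 1 l.length).flatMap
      (fun k => (pyCombinations k l).filter (fun x => x.sum == t)) := by
  simp [groupComb, List.range'_eq_map_range, List.flatMap_map, Nat.add_comm]

theorem foldA_blocks (l : List Int) (t : Int) :
    ∀ ks : List Nat, (∀ k ∈ ks, 1 ≤ k) → ∀ r : Int × Int,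
      List.foldl (fun res x =>
          let next := ((x.length : Int), prodReduce x)
          if pyLtPair next res then next else res) r
        (ks.flatMap (fun k => (pyCombinations k l).filter (fun x => x.sum == t)))
      = List.foldl foldStep r (ks.flatMap (blockP t l)) := by
  intro ks hks
  induction ks with
  | nil => intro r; rfl
  | cons k rest ih =>
    intro r
    rw [List.flatMap_cons, List.flatMap_cons, List.foldl_append, List.foldl_append]
    have hblock : List.foldl (fun res x =>
          let next := ((x.length : Int), prodReduce x)
          if pyLtPair next res then next else res) r
        ((pyCombinations k l).filter (fun x => x.sum == t))
        = List.foldl foldStep r (blockP t l k) := by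
      have hmap : ((pyCombinations k l).filter (fun x => x.sum == t)).map
            (fun x => (((x.length : Int), prodReduce x) : Int × Int)) = blockP t l k := by
        rw [blockP, prodsAt, List.map_map]
        apply List.map_congr_left
        intro x hx
        have hxc : x ∈ pyCombinations k l := List.mem_of_mem_filter hx
        have hlen : x.length = k := length_of_mem_comb hxc
        have hne : x ≠ [] := by
          intro hnil
          have h1 : 1 ≤ k := hks k (by simp)
          rw [hnil] at hlen
          simp at hlen
          omega
        simp [Function.comp, hlen, prodReduce_eq_prodAcc hne]
      rw [← hmap, List.foldl_map]
      rfl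
    rw [hblock]
    exact ih (fun k' hk' => hks k' (by simp [hk'])) _

theorem pairwise_lt_range'_one (s n : Nat) : (List.range' s n).Pairwise (· < ·) := by
  induction n generalizing s with
  | zero => exact List.Pairwise.nil
  | succ n ih =>
    rw [List.range'_succ]
    exact List.pairwise_cons.mpr ⟨fun m hm => (List.mem_range'_1.mp hm).1, ih (s+1)⟩

theorem main_eq (data : List Int) (hlen : data.length < 99999) :
    part_2 data = part_2_alt data := by
  have hperm : (PySem.List.sorted data (fun x => x) true).Perm data :=
    PySem.List.sorted_perm data (fun x => x) true
  have hsum : (PySem.List.sorted data (fun x => x) true).sum = data.sum := hperm.sum_eq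
  have hn : (PySem.List.sorted data (fun x => x) true).length = data.length := hperm.length_eq
  simp only [part_2, part_2_alt]
  rw [hsum, groupComb_split, hn]
  rw [foldA_blocks _ _ _ (fun k hk => (List.mem_range'_1.mp hk).1)]
  rw [chainA _ _ _ _ (pairwise_lt_range'_one 1 data.length)
    (fun k hk => by
      have := (List.mem_range'_1.mp hk).2
      simp only []
      omega)]
  rw [altSearch_eq, firstNE_congr hperm]
  cases firstNE (PySem.Int.floordiv data.sum 4) data (List.range' 1 data.length) with
  | none => rfl
  | some km => rfl

-- ===== VERDICT (by name: the statement is the Claim_ definition above) =====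
theorem part_2_spec : Claim_equal_part_2 := by
  intro data _ hpre
  exact main_eq data hpre.2
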